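-- pv_equiv track=rewrite | github.com/phntmzn/Search-Sort | postman-sort.py | postman_sort
-- ===== SOURCE A (Python) =====
-- from collections import defaultdict
--
-- def postman_sort(arr):
--     if not arr: return []
--
--     # Step 1: Create buckets based on first digit (simulating postal zones)
--     buckets = defaultdict(list)
--     for num in arr:
--         zone = str(num)[0]  # first digit as zone
--         buckets[zone].append(num)
--
--     # Step 2: Locally sort each bucket and merge
--     sorted_arr = []
--     for zone in sorted(buckets.keys()):
--         sorted_arr.extend(sorted(buckets[zone]))
--
--     return sorted_arr
-- ===== SOURCE B (Python) =====
-- def postman_sort(arr):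
--     return sorted(arr, key=lambda x: (str(x)[0], x))
-- ===== Notes on version B (the rewrite author's own statement) =====
-- stated objective: simpler
-- what changed: The bucket-by-first-character defaultdict, the per-bucket sort loop and the merge loop are replaced by one sorted() call with the composite key (str(x)[0], x), which reproduces the zone grouping and the numeric intra-zone order.
import Mathlib
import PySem

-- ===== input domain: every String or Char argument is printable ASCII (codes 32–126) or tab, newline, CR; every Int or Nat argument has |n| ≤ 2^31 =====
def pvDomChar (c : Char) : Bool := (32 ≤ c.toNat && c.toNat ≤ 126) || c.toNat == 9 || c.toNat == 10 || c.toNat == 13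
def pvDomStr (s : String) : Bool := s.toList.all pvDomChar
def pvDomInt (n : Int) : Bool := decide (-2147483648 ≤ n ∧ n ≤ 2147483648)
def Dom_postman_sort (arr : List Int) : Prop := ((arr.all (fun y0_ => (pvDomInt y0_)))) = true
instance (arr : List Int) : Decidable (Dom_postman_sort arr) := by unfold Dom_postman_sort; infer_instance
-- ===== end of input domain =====

-- B replaces A's bucket-by-first-character dict, per-bucket sorts and merge loop by ONE
-- stable sort with the composite key (str(x)[0], x) — same output, simpler decomposition.

-- ===== PORT A =====
-- str(num)[0]: str(n) is never empty, so taking the head with a dummy default is exact.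
-- Python's zone keys are one-character strings; one-character strings compare exactly as
-- their single Chars, so the dict is keyed by Char here.
def pvZone (n : Int) : Char := (PySem.Int.toChars n).headD ' '

def postman_sort (arr : List Int) : List Int :=
  if arr = [] then []
  else
    -- Step 1: buckets = defaultdict(list); for num in arr: buckets[str(num)[0]].append(num)
    let buckets : PySem.Dict Char (List Int) :=
      arr.foldl (fun d num => d.modify (pvZone num) [] (fun b => b ++ [num])) PySem.Dict.empty
    -- Step 2: for zone in sorted(buckets.keys()): sorted_arr.extend(sorted(buckets[zone]))
    (PySem.List.sorted buckets.keys (fun k => k)).foldl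
      (fun sorted_arr zone => sorted_arr ++ PySem.List.sorted (buckets.getD zone []) (fun x => x)) []

-- ===== PORT B =====
-- return sorted(arr, key=lambda x: (str(x)[0], x))
def postman_sort_alt (arr : List Int) : List Int :=
  PySem.List.sorted2 arr (fun x => pvZone x) (fun x => x)

-- ===== PRECONDITION & SPEC =====
def Spec_postman_sort (arr : List Int) (out : List Int) : Prop := out = postman_sort_alt arr
instance (arr : List Int) (out : List Int) : Decidable (Spec_postman_sort arr out) := by unfold Spec_postman_sort; infer_instance

-- ===== CLAIM (what is proved, stated in full; the proofs are below) =====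
def Claim_equal_postman_sort : Prop := ∀ (arr : List Int), Dom_postman_sort arr → Spec_postman_sort arr (postman_sort arr)

-- ===== LEMMAS AND PROOFS =====

-- the lexicographic key both programs sort by
def pvKey (n : Int) : Lex (Char × Int) := toLex (pvZone n, n)

-- the order both outputs are Pairwise-sorted in
def pvLe (a b : Int) : Prop := pvZone a < pvZone b ∨ (pvZone a = pvZone b ∧ a ≤ b)

-- B's hand-rolled two-component comparison is exactly the lexicographic key order
lemma pv_alt_eq_sorted_key (arr : List Int) :
    postman_sort_alt arr = PySem.List.sorted arr pvKey := by
  unfold postman_sort_alt PySem.List.sorted2 PySem.List.sorted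
  have hb : (fun a b : Int =>
        decide (pvZone a < pvZone b) || (!decide (pvZone b < pvZone a) && decide (a < b)))
      = fun a b : Int => decide (pvKey a < pvKey b) := by
    funext a b
    rcases lt_trichotomy (pvZone a) (pvZone b) with h | h | h
    · simp [pvKey, Prod.Lex.lt_iff, h, ne_of_lt h]
    · simp [pvKey, Prod.Lex.lt_iff, h]
    · simp [pvKey, Prod.Lex.lt_iff, h, lt_asymm h, ne_of_gt h]
  simp only [Bool.false_eq_true, if_false, hb]

lemma pv_sorted_key_perm (arr : List Int) : (PySem.List.sorted arr pvKey).Perm arr :=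
  PySem.List.sorted_perm arr pvKey false

lemma pv_sorted_key_pairwise (arr : List Int) :
    (PySem.List.sorted arr pvKey).Pairwise pvLe := by
  refine (PySem.List.sorted_pairwise arr pvKey).imp ?_
  intro a b h
  rcases Prod.Lex.le_iff.mp h with h' | h'
  · exact Or.inl h'
  · exact Or.inr h'

-- the bucket built by A's first loop holds exactly the zone-z elements of arr, in order
lemma pv_bucket_getD (arr : List Int) (z : Char) :
    (arr.foldl (fun d num => d.modify (pvZone num) [] (fun b => b ++ [num]))
        PySem.Dict.empty).getD z []
      = arr.filter (fun n => pvZone n == z) := by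
  have h := PySem.Dict.getD_foldl_modify_append
      (arr.map (fun n => (pvZone n, n))) (PySem.Dict.empty (κ := Char) (ν := List Int)) z
  rw [List.foldl_map] at h
  rw [h, List.filter_map, List.map_map]
  simp [Function.comp_def]

-- A's dict keys are the distinct zones of arr
lemma pv_keys_mem (arr : List Int) (z : Char) :
    z ∈ (arr.foldl (fun d num => d.modify (pvZone num) [] (fun b => b ++ [num]))
        PySem.Dict.empty).keys ↔ z ∈ arr.map pvZone := by
  rw [PySem.Dict.keys_foldl_modify_key arr pvZone [] (fun _ x => (fun b => b ++ [x]))]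
  simp [PySem.Set.mem_update, PySem.Dict.keys_empty]

lemma pv_keys_nodup (arr : List Int) :
    (arr.foldl (fun d num => d.modify (pvZone num) [] (fun b => b ++ [num]))
        PySem.Dict.empty).keys.Nodup :=
  PySem.Dict.nodup_keys_foldl_modify_key arr pvZone [] (fun _ x => (fun b => b ++ [x])) _
    (by simp [PySem.Dict.keys_empty])

-- concatenating the zone-filters over a duplicate-free list of all zones is a permutation of l
lemma pv_flatMap_filter_perm (ks : List Char) (l : List Int)
    (hnd : ks.Nodup) (hall : ∀ a ∈ l, pvZone a ∈ ks) :
    (ks.flatMap (fun z => l.filter (fun n => pvZone n == z))).Perm l := by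
  induction ks generalizing l with
  | nil =>
    cases l with
    | nil => simp
    | cons a t => exact absurd (hall a (by simp)) (by simp)
  | cons z ks ih =>
    rw [List.flatMap_cons]
    have hz : z ∉ ks := (List.nodup_cons.mp hnd).1
    have hcong : ks.flatMap (fun z' => l.filter (fun n => pvZone n == z'))
        = ks.flatMap (fun z' => (l.filter (fun n => !(pvZone n == z))).filter
            (fun n => pvZone n == z')) := by
      refine List.flatMap_congr ?_
      intro z' hz'
      rw [List.filter_filter]
      refine List.filter_congr ?_
      intro n _
      by_cases hnz : pvZone n = z'
      · have hne : ¬ z' = z := fun hzz => hz (hzz ▸ hz')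
        simp [hnz, hne]
      · simp [hnz]
    rw [hcong]
    have hside : ∀ a ∈ l.filter (fun n => !(pvZone n == z)), pvZone a ∈ ks := by
      intro a ha
      have ha' := List.mem_filter.mp ha
      have hmem := hall a ha'.1
      simp only [List.mem_cons] at hmem
      rcases hmem with h | h
      · simp [h] at ha'
      · exact h
    have htail := ih (l.filter (fun n => !(pvZone n == z))) (List.nodup_cons.mp hnd).2 hside
    exact (htail.append_left _).trans (List.filter_append_perm _ l)

-- antisymmetry of pvLe on Int
lemma pv_le_antisymm (a b : Int) (h1 : pvLe a b) (h2 : pvLe b a) : a = b := by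
  rcases h1 with h1 | ⟨hz1, h1⟩ <;> rcases h2 with h2 | ⟨hz2, h2⟩
  · exact absurd h2 (lt_asymm h1)
  · exact absurd h1 (by rw [hz2]; exact lt_irrefl _)
  · exact absurd h2 (by rw [hz1]; exact lt_irrefl _)
  · omega

theorem postman_sort_spec : Claim_equal_postman_sort := by
  intro arr _
  unfold Spec_postman_sort
  rw [pv_alt_eq_sorted_key]
  unfold postman_sort
  by_cases hnil : arr = []
  · subst hnil; simp [PySem.List.sorted]
  · simp only [if_neg hnil]
    set buckets := arr.foldl (fun d num => d.modify (pvZone num) [] (fun b => b ++ [num]))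
        PySem.Dict.empty with hbuckets
    set ks := PySem.List.sorted buckets.keys (fun k => k) with hks
    rw [PySem.List.foldl_append_eq_flatMap
        (fun zone => PySem.List.sorted (buckets.getD zone []) (fun x => x)) ks []]
    rw [List.nil_append]
    have hbget : ∀ z, buckets.getD z [] = arr.filter (fun n => pvZone n == z) :=
      fun z => pv_bucket_getD arr z
    have hksnd : ks.Nodup := (PySem.List.sorted_perm _ _ _).nodup_iff.mpr (pv_keys_nodup arr)
    have hksmem : ∀ z, z ∈ ks ↔ z ∈ arr.map pvZone := by
      intro z
      rw [hks, PySem.List.mem_sorted]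
      exact pv_keys_mem arr z
    have hkslt : ks.Pairwise (fun a b : Char => a < b) := by
      have h1 : ks.Pairwise (fun a b : Char => a ≤ b) :=
        PySem.List.sorted_pairwise buckets.keys (fun k => k)
      have h2 : ks.Pairwise (fun a b : Char => a ≠ b) := hksnd
      exact (h1.and h2).imp (fun h => lt_of_le_of_ne h.1 h.2)
    -- the merged output: within-chunk and across-chunk ordering, and a permutation of arr
    have hperm : (ks.flatMap
        (fun z => PySem.List.sorted (buckets.getD z []) (fun x => x))).Perm arr := by
      have h1 : (ks.flatMap (fun z => PySem.List.sorted (buckets.getD z []) (fun x => x))).Perm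
          (ks.flatMap (fun z => arr.filter (fun n => pvZone n == z))) := by
        refine List.Perm.flatMap_left ks ?_
        intro z _
        rw [hbget z]
        exact PySem.List.sorted_perm _ _ _
      exact h1.trans (pv_flatMap_filter_perm ks arr hksnd
        (fun a ha => (hksmem (pvZone a)).mpr (List.mem_map_of_mem ha)))
    have hpw : (ks.flatMap
        (fun z => PySem.List.sorted (buckets.getD z []) (fun x => x))).Pairwise pvLe := by
      rw [List.pairwise_flatMap]
      constructor
      · intro z _
        have hmem : ∀ x ∈ PySem.List.sorted (buckets.getD z []) (fun x => x), pvZone x = z := by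
          intro x hx
          rw [PySem.List.mem_sorted, hbget z] at hx
          exact by simpa using (List.mem_filter.mp hx).2
        refine (PySem.List.sorted_pairwise (buckets.getD z []) (fun x => x)).imp_of_mem ?_
        intro a b ha hb h
        exact Or.inr ⟨(hmem a ha).trans (hmem b hb).symm, h⟩
      · refine hkslt.imp_of_mem ?_
        intro z1 z2 _ _ h x hx y hy
        rw [PySem.List.mem_sorted, hbget _] at hx hy
        have hx' := (List.mem_filter.mp hx).2
        have hy' := (List.mem_filter.mp hy).2
        left
        have : pvZone x = z1 := by simpa using hx'
        have hy'' : pvZone y = z2 := by simpa using hy'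
        rw [this, hy'']
        exact h
    -- both sides are sorted permutations of arr under the antisymmetric order pvLe
    refine List.Perm.eq_of_pairwise ?_ hpw (pv_sorted_key_pairwise arr)
      (hperm.trans (pv_sorted_key_perm arr).symm)
    intro a b _ _ h1 h2
    exact pv_le_antisymm a b h1 h2
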